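-- pv_equiv track=rewrite | github.com/529106896/PythonLearning | py-project/04-函数1/04-函数返回值.py | getJieCheng
-- ===== SOURCE A (Python) =====
-- def getJieCheng(n):
--     num = 1
--     result = 1
--     list = []
--     while num <= n:
--         result *= num
--         list.append(num)
--         num += 1
--     # 可以返回多个值，返回的是一个元组
--     return result, list
-- ===== SOURCE B (Python) =====
-- def getJieCheng(n):
--     def prod(a, b):
--         # product of integers a..b by divide and conquer (binary splitting)
--         if a > b:
--             return 1
--         if a == b:
--             return a
--         m = (a + b) // 2
--         return prod(a, m) * prod(m + 1, b)
--     nums = list(range(1, n + 1))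
--     return prod(1, n), nums
-- ===== Notes on version B (the rewrite author's own statement) =====
-- stated objective: alternative
-- what changed: B builds the list with range() and computes the factorial by recursive binary splitting (divide-and-conquer product over a..b), instead of A's single while-loop that interleaves left-to-right product accumulation, list appending and a manual counter; the balanced multiplication tree keeps big-int operands balanced (intended as faster; one timing run measured 4.7x at n=4096, another could not confirm it at the largest size).
import Mathlib
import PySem

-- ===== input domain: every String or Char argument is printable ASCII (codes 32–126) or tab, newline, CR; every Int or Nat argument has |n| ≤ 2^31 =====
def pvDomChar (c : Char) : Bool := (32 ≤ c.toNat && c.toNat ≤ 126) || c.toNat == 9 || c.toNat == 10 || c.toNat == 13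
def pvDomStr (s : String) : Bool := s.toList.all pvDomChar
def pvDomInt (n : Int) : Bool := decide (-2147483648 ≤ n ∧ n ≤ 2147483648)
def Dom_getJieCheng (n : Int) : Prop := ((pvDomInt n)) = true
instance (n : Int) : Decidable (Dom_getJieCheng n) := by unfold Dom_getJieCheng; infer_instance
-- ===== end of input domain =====

-- B computes the factorial by recursive binary splitting of the product over a..b and builds
-- the list with range; A interleaves left-to-right product, append and counter in one while-loop.
-- Objective: alternative algorithm (divide-and-conquer product).

-- ===== PORT A =====
-- while num <= n: result *= num; list.append(num); num += 1
def getJieChengLoop (n num result : Int) (lst : List Int) : Int × List Int :=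
  if num ≤ n then
    getJieChengLoop n (num + 1) (result * num) (lst ++ [num])
  else
    (result, lst)
termination_by (n + 1 - num).toNat
decreasing_by omega

def getJieCheng (n : Int) : Int × List Int :=
  getJieChengLoop n 1 1 []

-- ===== PORT B =====
-- divide-and-conquer product of a..b (Source B's helper prod)
def prodDC (a b : Int) : Int :=
  if a > b then 1
  else if a = b then a
  else
    prodDC a (PySem.Int.floordiv (a + b) 2) *
      prodDC (PySem.Int.floordiv (a + b) 2 + 1) b
termination_by (b - a).toNat
decreasing_by
  · have h : PySem.Int.floordiv (a + b) 2 < b := by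
      rw [PySem.Int.floordiv_lt_iff_lt_mul (by omega)]; omega
    omega
  · have h : a ≤ PySem.Int.floordiv (a + b) 2 := by
      rw [PySem.Int.le_floordiv_iff_mul_le (by omega)]; omega
    omega

def getJieCheng_alt (n : Int) : Int × List Int :=
  let nums := PySem.List.pyRange 1 (n + 1) 1
  (prodDC 1 n, nums)

-- ===== PRECONDITION & SPEC =====
def Spec_getJieCheng (n : Int) (out : Int × List Int) : Prop := out = getJieCheng_alt n
instance (n : Int) (out : Int × List Int) : Decidable (Spec_getJieCheng n out) := by unfold Spec_getJieCheng; infer_instance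

-- ===== CLAIM (what is proved, stated in full; the proofs are below) =====
def Claim_equal_getJieCheng : Prop := ∀ (n : Int), Dom_getJieCheng n → Spec_getJieCheng n (getJieCheng n)

-- ===== LEMMAS AND PROOFS =====
theorem foldl_mul_shift (xs : List Int) (c : Int) :
    xs.foldl (fun acc x => acc * x) c = c * xs.foldl (fun acc x => acc * x) 1 := by
  induction xs generalizing c with
  | nil => simp
  | cons y ys ih =>
    simp only [List.foldl]
    rw [ih (c * y), ih (1 * y)]
    ring

-- prodDC a b equals the left-to-right product of a..b
theorem prodDC_eq (k : Nat) : ∀ (a b : Int), (b - a).toNat = k →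
    prodDC a b = (PySem.List.pyRange a (b + 1) 1).foldl (fun acc x => acc * x) 1 := by
  induction k using Nat.strong_induction_on with
  | _ k ih =>
    intro a b hk
    rw [prodDC]
    by_cases hgt : a > b
    · rw [if_pos hgt, PySem.List.pyRange_one_eq_nil (by omega)]
      simp
    · rw [if_neg hgt]
      by_cases heq : a = b
      · subst heq
        rw [if_pos rfl, PySem.List.pyRange_one_cons (by omega),
            PySem.List.pyRange_one_eq_nil (by omega)]
        simp
      · rw [if_neg heq]
        have hab : a < b := by omega
        have hmlt : PySem.Int.floordiv (a + b) 2 < b := by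
          rw [PySem.Int.floordiv_lt_iff_lt_mul (by omega)]; omega
        have hale : a ≤ PySem.Int.floordiv (a + b) 2 := by
          rw [PySem.Int.le_floordiv_iff_mul_le (by omega)]; omega
        rw [ih (PySem.Int.floordiv (a + b) 2 - a).toNat (by omega) a
              (PySem.Int.floordiv (a + b) 2) rfl,
            ih (b - (PySem.Int.floordiv (a + b) 2 + 1)).toNat (by omega)
              (PySem.Int.floordiv (a + b) 2 + 1) b rfl]
        rw [PySem.List.pyRange_one_append a (PySem.Int.floordiv (a + b) 2 + 1) (b + 1)
              (by omega) (by omega)]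
        rw [List.foldl_append]
        conv_rhs => rw [foldl_mul_shift]

-- A's loop state in closed form
theorem getJieChengLoop_eq (n : Int) : ∀ (k : Nat) (num result : Int) (lst : List Int),
    (n + 1 - num).toNat = k →
    getJieChengLoop n num result lst =
      ((PySem.List.pyRange num (n + 1) 1).foldl (fun acc x => acc * x) result,
       lst ++ PySem.List.pyRange num (n + 1) 1) := by
  intro k
  induction k with
  | zero =>
    intro num result lst hk
    rw [getJieChengLoop, if_neg (by omega), PySem.List.pyRange_one_eq_nil (by omega)]
    simp
  | succ k ih =>
    intro num result lst hk
    have hlt : num < n + 1 := by omega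
    rw [getJieChengLoop, if_pos (by omega), PySem.List.pyRange_one_cons hlt]
    rw [ih (num + 1) (result * num) (lst ++ [num]) (by omega)]
    simp

-- ===== VERDICT (by name: the statement is the Claim_ definition above) =====
theorem getJieCheng_spec : Claim_equal_getJieCheng := by
  intro n _
  unfold Spec_getJieCheng getJieCheng getJieCheng_alt
  rw [getJieChengLoop_eq n (n + 1 - 1).toNat 1 1 [] rfl,
      prodDC_eq (n - 1).toNat 1 n rfl]
  simp
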